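-- pv_equiv track=rewrite | github.com/mghods95/BCN-Seminar | SHA-256 Description/sha256_algorithm.py | preprocess_message
-- ===== SOURCE A (Python) =====
-- def preprocess_message(input_string):
--     # Step 1: Encode input into binary (UTF-8 standard)
--     # For 'Blockchain', this results in an 80-bit binary string.
--
--     # Python's default bytes encoding for strings is often UTF-8, which covers ASCII.
--     # We convert to binary string representation of the bytes.
--     binary_message = ''.join(format(byte, '08b') for byte in input_string.encode('utf-8'))
--
--     # Step 2: Padding
--     original_length = len(binary_message)
--
--     # 2a: Append a single '1' bit
--     binary_message += '1'
--
--     # 2b: Append k zero bits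
--     # The message must be a multiple of 512 bits.
--     # Pad until length is 448 mod 512 (which is 64 bits short of 512).
--     # Since we added '1', length is now original_length + 1.
--     k = (448 - (original_length + 1) % 512) % 512
--     binary_message += '0' * k
--
--     # 2c: Append the 64-bit original length
--     length_bits = format(original_length, '064b')
--     binary_message += length_bits
--
--     # Step 2: Break padded message into 512-bit blocks
--     # For 'Blockchain', N=1 block
--     blocks = []
--     for i in range(0, len(binary_message), 512):
--         blocks.append(binary_message[i:i + 512])
--
--     return blocks
-- ===== SOURCE B (Python) =====
-- def preprocess_message(input_string):
--     # Byte-level padding: append 0x80 then zero bytes so that the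
--     # bit length (plus the 64-bit length field) fills 512-bit blocks.
--     data = input_string.encode('utf-8')
--     zeros = (55 - len(data)) % 64
--     padded = data + b'\x80' + b'\x00' * zeros
--     bits = ''.join(format(b, '08b') for b in padded)
--     bits += format(len(data) * 8, '064b')
--     blocks = []
--     while bits:
--         blocks.append(bits[:512])
--         bits = bits[512:]
--     return blocks
-- ===== Notes on version B (the rewrite author's own statement) =====
-- stated objective: alternative
-- what changed: B pads at the byte level (append 0x80 and (55-len)%64 zero bytes computed arithmetically, then render bits once) instead of A's render-then-pad bit-string arithmetic, and chunks with a consuming while loop over the string instead of A's index range loop.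
import Mathlib
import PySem

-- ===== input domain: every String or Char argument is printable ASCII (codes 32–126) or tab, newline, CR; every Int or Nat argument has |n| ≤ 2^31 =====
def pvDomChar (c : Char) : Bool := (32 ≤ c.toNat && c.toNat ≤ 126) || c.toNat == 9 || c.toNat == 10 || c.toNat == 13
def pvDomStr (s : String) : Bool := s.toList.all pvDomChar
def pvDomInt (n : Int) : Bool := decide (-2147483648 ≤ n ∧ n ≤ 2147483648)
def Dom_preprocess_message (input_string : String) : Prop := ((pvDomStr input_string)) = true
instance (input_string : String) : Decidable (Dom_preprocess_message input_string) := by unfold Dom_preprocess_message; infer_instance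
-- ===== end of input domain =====

-- B pads the message at the byte level (append 0x80 and (55-len)%64 zero bytes) instead of
-- A's bit-string padding arithmetic; return value identical on Dom (ASCII, where UTF-8 is one byte per char).

-- ===== PORT A =====
-- format(n, '0Wb') for the widths A uses: binary digits zero-padded on the left to width w
def pmFmt (w : Nat) (n : Int) : List Char :=
  let d := PySem.Int.toBinChars n
  List.replicate (w - d.length) '0' ++ d

-- input_string.encode('utf-8'): exact on Dom (ASCII incl. tab/newline/CR — one byte per char, equal to its code point)
def pmBytes (s : String) : List Int := s.toList.map (fun c => (c.toNat : Int))

def preprocess_message (input_string : String) : List String :=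
  let binary_message := (pmBytes input_string).flatMap (fun b => pmFmt 8 b)
  let original_length : Int := PySem.List.len binary_message
  let withOne := binary_message ++ ['1']
  let k := PySem.Int.mod (448 - PySem.Int.mod (original_length + 1) 512) 512
  -- '0' * k: k ≥ 0 (mod by a positive divisor), so .toNat is exact
  let padded := withOne ++ List.replicate k.toNat '0'
  let full := padded ++ pmFmt 64 original_length
  (PySem.List.pyRange 0 (PySem.List.len full) 512).foldl
    (fun blocks i => blocks ++ [String.ofList (PySem.List.slice full (some i) (some (i + 512)))]) []

-- ===== PORT B =====
-- 'while bits: blocks.append(bits[:512]); bits = bits[512:]'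
def pmChunks (s : List Char) : List String :=
  if h : s = [] then []
  else String.ofList (PySem.List.slice s none (some 512)) :: pmChunks (PySem.List.slice s (some 512) none)
termination_by s.length
decreasing_by
  rw [PySem.List.slice_from s (by norm_num : (0:Int) ≤ (512:Int))]
  have : 0 < s.length := List.length_pos_of_ne_nil h
  simp only [List.length_drop]
  omega

def preprocess_message_alt (input_string : String) : List String :=
  let data := pmBytes input_string
  let zeros := PySem.Int.mod (55 - PySem.List.len data) 64
  -- b'\x00' * zeros: zeros ≥ 0 (mod by a positive divisor), so .toNat is exact
  let padded := data ++ [(128 : Int)] ++ List.replicate zeros.toNat (0 : Int)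
  let bits := padded.flatMap (fun b => pmFmt 8 b) ++ pmFmt 64 (PySem.List.len data * 8)
  pmChunks bits

-- ===== PRECONDITION & SPEC =====
def Spec_preprocess_message (input_string : String) (out : List String) : Prop := out = preprocess_message_alt input_string
instance (input_string : String) (out : List String) : Decidable (Spec_preprocess_message input_string out) := by unfold Spec_preprocess_message; infer_instance

-- ===== CLAIM (what is proved, stated in full; the proofs are below) =====
def Claim_equal_preprocess_message : Prop := ∀ (input_string : String), Dom_preprocess_message input_string → Spec_preprocess_message input_string (preprocess_message input_string)

-- ===== LEMMAS AND PROOFS =====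

lemma pmToBin_len {n : Nat} (h : n ≤ 126) : (PySem.Int.toBinChars (n : Int)).length ≤ 7 := by
  have hall : (List.range 127).all (fun m => decide ((Nat.toDigits 2 m).length ≤ 7)) = true := by decide
  have hn := List.all_eq_true.mp hall n (List.mem_range.mpr (by omega))
  simp only [decide_eq_true_eq] at hn
  simpa [PySem.Int.toBinChars, show ¬((n:Int) < 0) by omega] using hn

lemma pmFmt8_len {n : Nat} (h : n ≤ 126) : (pmFmt 8 (n : Int)).length = 8 := by
  have := pmToBin_len h
  simp only [pmFmt, List.length_append, List.length_replicate]
  omega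

lemma pmMsg_len (l : List Char) (h : l.all pvDomChar = true) :
    ((l.map (fun c => (c.toNat : Int))).flatMap (fun b => pmFmt 8 b)).length = 8 * l.length := by
  induction l with
  | nil => simp
  | cons c t ih =>
    simp only [List.all_cons, Bool.and_eq_true] at h
    have hc : c.toNat ≤ 126 := by
      have := h.1
      simp only [pvDomChar, Bool.or_eq_true, Bool.and_eq_true, decide_eq_true_eq, beq_iff_eq] at this
      omega
    simp only [List.map_cons, List.flatMap_cons, List.length_append, ih h.2,
      pmFmt8_len hc, List.length_cons]
    omega

lemma pmFmt8_zero : pmFmt 8 (0 : Int) = List.replicate 8 '0' := by decide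

lemma pmFmt8_128 : pmFmt 8 (128 : Int) = '1' :: List.replicate 7 '0' := by decide

lemma pmFlatMap_zeros (z : Nat) :
    (List.replicate z (0 : Int)).flatMap (fun b => pmFmt 8 b) = List.replicate (8 * z) '0' := by
  induction z with
  | zero => simp
  | succ z ih =>
    rw [List.replicate_succ, List.flatMap_cons, ih, pmFmt8_zero]
    rw [show 8 * (z + 1) = 8 + 8 * z by ring, List.replicate_add]

lemma pmK_eq (n : Nat) :
    (PySem.Int.mod (448 - PySem.Int.mod (((8 * n : Nat) : Int) + 1) 512) 512).toNat
      = 7 + 8 * (PySem.Int.mod (55 - (n : Int)) 64).toNat := by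
  rw [PySem.Int.mod_eq_emod_of_pos (by norm_num), PySem.Int.mod_eq_emod_of_pos (by norm_num),
    PySem.Int.mod_eq_emod_of_pos (by norm_num)]
  omega

lemma pyRange_step512_nil {b : Int} (h : b ≤ 0) : PySem.List.pyRange 0 b 512 = [] := by
  rw [PySem.List.pyRange_of_pos 0 b (by norm_num), if_neg (by omega)]
  simp

lemma pyRange_step512_cons {b : Int} (h : 0 < b) :
    PySem.List.pyRange 0 b 512 = 0 :: (PySem.List.pyRange 0 (b - 512) 512).map (fun x => x + 512) := by
  rw [PySem.List.pyRange_of_pos 0 b (by norm_num), PySem.List.pyRange_of_pos 0 (b - 512) (by norm_num),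
    if_pos h]
  have hcnt : ((b - 0 + 512 - 1) / 512).toNat
      = (if 0 < b - 512 then ((b - 512 - 0 + 512 - 1) / 512).toNat else 0) + 1 := by
    split <;> omega
  rw [hcnt, List.range_succ_eq_map, List.map_cons, List.map_map, List.map_map]
  refine congrArg₂ _ (by norm_num) (List.map_congr_left ?_)
  intro k _
  simp only [Function.comp_apply]
  push_cast
  ring

lemma pmSlice_shift (s : List Char) {i : Int} (hi : 0 ≤ i) :
    PySem.List.slice s (some (i + 512)) (some (i + 512 + 512))
      = PySem.List.slice (s.drop 512) (some i) (some (i + 512)) := by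
  rw [PySem.List.slice_toNat s (by omega) (by omega), PySem.List.slice_toNat (s.drop 512) hi (by omega)]
  rw [List.drop_drop]
  have h1 : (i + 512).toNat = i.toNat + 512 := by omega
  rw [h1]
  have e1 : (i + 512 + 512).toNat - (i.toNat + 512) = 512 := by omega
  have e2 : i.toNat + 512 - i.toNat = 512 := by omega
  rw [e1, e2, Nat.add_comm 512 i.toNat]

lemma pmChunks_eq : ∀ (m : Nat) (s : List Char), s.length ≤ m →
    (PySem.List.pyRange 0 (s.length : Int) 512).map
      (fun i => String.ofList (PySem.List.slice s (some i) (some (i + 512)))) = pmChunks s := by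
  intro m
  induction m with
  | zero =>
    intro s hs
    have : s = [] := List.eq_nil_of_length_eq_zero (by omega)
    subst this
    rw [pmChunks]
    simp [pyRange_step512_nil]
  | succ m ih =>
    intro s hs
    by_cases hnil : s = []
    · subst hnil
      rw [pmChunks]
      simp [pyRange_step512_nil]
    · have hl : 0 < s.length := List.length_pos_of_ne_nil hnil
      rw [pyRange_step512_cons (by exact_mod_cast hl), List.map_cons, List.map_map]
      conv_rhs => rw [pmChunks]
      rw [dif_neg hnil]
      refine congrArg₂ _ ?_ ?_
      · have h512 : (0 : Int) + 512 = 512 := by norm_num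
        rw [h512, PySem.List.slice_zero_start]
      · rw [PySem.List.slice_from s (by norm_num : (0:Int) ≤ (512:Int))]
        have hdrop : (512 : Int).toNat = 512 := by decide
        rw [hdrop]
        by_cases hbig : 512 < s.length
        · have hlen : ((s.drop 512).length : Int) = (s.length : Int) - 512 := by
            simp only [List.length_drop]; omega
          rw [← ih (s.drop 512) (by simp only [List.length_drop]; omega), hlen]
          refine List.map_congr_left ?_
          intro i hi
          have h0i : 0 ≤ i := ((PySem.List.mem_pyRange_iff_of_pos (by norm_num) i).mp hi).1
          simp only [Function.comp_apply]
          rw [show i + 512 + 512 = (i + 512) + 512 by ring, pmSlice_shift s h0i]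
        · have : (s.length : Int) - 512 ≤ 0 := by omega
          rw [pyRange_step512_nil this, List.map_nil]
          have : s.drop 512 = [] := List.drop_eq_nil_of_le (by omega)
          rw [this, pmChunks]
          simp

lemma pmBits_eq (s : String) (hD : Dom_preprocess_message s) :
    (pmBytes s).flatMap (fun b => pmFmt 8 b) ++ ['1']
        ++ List.replicate (PySem.Int.mod (448 - PySem.Int.mod
              (PySem.List.len ((pmBytes s).flatMap (fun b => pmFmt 8 b)) + 1) 512) 512).toNat '0'
        ++ pmFmt 64 (PySem.List.len ((pmBytes s).flatMap (fun b => pmFmt 8 b)))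
      = ((pmBytes s) ++ [(128 : Int)]
          ++ List.replicate (PySem.Int.mod (55 - PySem.List.len (pmBytes s)) 64).toNat (0 : Int)).flatMap
            (fun b => pmFmt 8 b)
        ++ pmFmt 64 (PySem.List.len (pmBytes s) * 8) := by
  have hmsg : ((pmBytes s).flatMap (fun b => pmFmt 8 b)).length = 8 * s.toList.length :=
    pmMsg_len s.toList hD
  have hdata : (pmBytes s).length = s.toList.length := by simp [pmBytes]
  rw [List.flatMap_append, List.flatMap_append, List.flatMap_cons, List.flatMap_nil,
    List.append_nil, pmFmt8_128, pmFlatMap_zeros]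
  simp only [PySem.List.len_eq, hmsg, hdata]
  rw [pmK_eq s.toList.length]
  have harg : ((8 * s.toList.length : Nat) : Int) = (s.toList.length : Int) * 8 := by push_cast; ring
  rw [harg]
  rw [List.replicate_add]
  simp [List.append_assoc]

-- ===== VERDICT (by name: the statement is the Claim_ definition above) =====
theorem preprocess_message_spec : Claim_equal_preprocess_message := by
  intro s hD
  unfold Spec_preprocess_message preprocess_message preprocess_message_alt
  simp only []
  rw [PySem.List.foldl_append_singleton_eq_map, List.nil_append]
  rw [← pmBits_eq s hD]
  set full := (pmBytes s).flatMap (fun b => pmFmt 8 b) ++ ['1']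
      ++ List.replicate (PySem.Int.mod (448 - PySem.Int.mod
            (PySem.List.len ((pmBytes s).flatMap (fun b => pmFmt 8 b)) + 1) 512) 512).toNat '0'
      ++ pmFmt 64 (PySem.List.len ((pmBytes s).flatMap (fun b => pmFmt 8 b))) with hfull
  rw [PySem.List.len_eq]
  exact pmChunks_eq full.length full le_rfl
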